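-- pv_equiv track=rewrite | github.com/rhoitjadhav/competitive-programming-practice | hackerrank/archive/common/Picking Numbers.py | pickingNumbers
-- ===== SOURCE A (Python) =====
-- def pickingNumbers(a):
--     maxx = 0
--     n = len(a)
--     a.sort()
--     for i in range(n):
--         count = 0
--         for j in range(i, n):
--             diff = abs(a[i] - a[j])
--             if diff == 1 or diff == 0:
--                 count += 1
--
--         maxx = max(count, maxx)
--
--     return maxx
-- ===== SOURCE B (Python) =====
-- def pickingNumbers(a):
--     # Frequency-counting re-implementation: the best subset picks all copies of
--     # some value v together with all copies of v+1.
--     # (Note: A sorts its argument in place; B does not mutate it. Return values agree.)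
--     freq = {}
--     for x in a:
--         freq[x] = freq.get(x, 0) + 1
--     best = 0
--     for v, c in freq.items():
--         best = max(best, c + freq.get(v + 1, 0))
--     return best
-- ===== Notes on version B (the rewrite author's own statement) =====
-- stated objective: faster
-- what changed: Replaced sort plus quadratic nested index scan by a single frequency-counting pass, answering with max over values v of freq[v]+freq[v+1].
import Mathlib
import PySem

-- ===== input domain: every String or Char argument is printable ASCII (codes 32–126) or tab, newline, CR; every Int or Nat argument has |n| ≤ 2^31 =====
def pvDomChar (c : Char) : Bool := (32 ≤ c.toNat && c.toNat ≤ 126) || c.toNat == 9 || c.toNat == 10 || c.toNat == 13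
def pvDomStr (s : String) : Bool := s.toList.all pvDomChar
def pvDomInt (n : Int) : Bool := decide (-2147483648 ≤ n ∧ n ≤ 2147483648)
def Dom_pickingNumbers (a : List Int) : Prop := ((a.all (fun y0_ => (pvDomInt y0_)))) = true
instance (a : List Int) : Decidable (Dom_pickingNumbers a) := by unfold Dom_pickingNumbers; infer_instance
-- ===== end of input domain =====

-- B replaces A's sort + quadratic nested index scan by one frequency-counting pass (objective: faster).
-- A sorts its argument in place (an observable mutation); B does not; the equivalence proved is about the return value.

-- ===== PORT A =====
def pickingNumbers (a : List Int) : Int :=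
  let s := PySem.List.sorted a (fun x => x) false
  let n : Int := (s.length : Int)
  (PySem.List.pyRange 0 n 1).foldl (fun maxx i =>
    let count := (PySem.List.pyRange i n 1).foldl (fun count j =>
      let diff := |PySem.List.pyGetD s i 0 - PySem.List.pyGetD s j 0|
      if diff = 1 ∨ diff = 0 then count + 1 else count) (0 : Int)
    max count maxx) 0

-- ===== PORT B =====
def pickingNumbers_alt (a : List Int) : Int :=
  let freq : PySem.Dict Int Int := a.foldl (fun d x => d.insert x (d.getD x 0 + 1)) PySem.Dict.empty
  freq.items.foldl (fun best p => max best (p.2 + freq.getD (p.1 + 1) 0)) 0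

-- ===== PRECONDITION & SPEC =====
def Spec_pickingNumbers (a : List Int) (out : Int) : Prop := out = pickingNumbers_alt a
instance (a : List Int) (out : Int) : Decidable (Spec_pickingNumbers a out) := by unfold Spec_pickingNumbers; infer_instance

-- ===== CLAIM (what is proved, stated in full; the proofs are below) =====
def Claim_equal_pickingNumbers : Prop := ∀ (a : List Int), Dom_pickingNumbers a → Spec_pickingNumbers a (pickingNumbers a)

-- ===== LEMMAS AND PROOFS =====

-- the sorted list A works on
def pvS (a : List Int) : List Int := PySem.List.sorted a (fun x => x) false

-- A's inner count at index k, written over the sorted list's suffix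
def pvCnt (a : List Int) (k : Nat) : Int :=
  (((pvS a).drop k).count ((pvS a).getD k 0) : Int) + (((pvS a).drop k).count ((pvS a).getD k 0 + 1) : Int)

-- B's score of a value
def pvG (a : List Int) (v : Int) : Int := (a.count v : Int) + (a.count (v + 1) : Int)

-- upper bound for a running max of a projection
theorem pv_foldl_max_le {β : Type} (l : List β) (f : β → Int) (init b : Int)
    (h0 : init ≤ b) (h : ∀ x ∈ l, f x ≤ b) :
    l.foldl (fun acc x => max acc (f x)) init ≤ b := by
  induction l generalizing init with
  | nil => simpa using h0
  | cons x t ih =>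
    simp only [List.foldl_cons]
    exact ih _ (max_le h0 (h x (by simp))) (fun y hy => h y (by simp [hy]))

-- countP of a two-valued disjunction is the sum of the two counts
theorem pv_countP_two (l : List Int) (v w : Int) (hvw : v ≠ w) :
    l.countP (fun y => decide (y = v ∨ y = w)) = l.count v + l.count w := by
  induction l with
  | nil => simp
  | cons x t ih =>
    simp only [List.countP_cons, List.count_cons, ih, decide_eq_true_eq, beq_iff_eq]
    split_ifs <;> omega

-- every element of the sorted list's suffix is ≥ the element at its head index
theorem pv_sorted_drop_ge (a : List Int) (k : Nat) (hk : k < (pvS a).length) :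
    ∀ y ∈ (pvS a).drop k, (pvS a).getD k 0 ≤ y := by
  intro y hy
  rw [List.mem_iff_getElem] at hy
  obtain ⟨i, hi, rfl⟩ := hy
  rw [List.getElem_drop, List.getD_eq_getElem _ _ hk]
  have hlen : k + i < (pvS a).length := by
    simp only [List.length_drop] at hi; omega
  exact PySem.List.sorted_id_getElem_mono a (Nat.le_add_right k i) hlen

-- A's port equals the range-fold of pvCnt
theorem pv_A_eq (a : List Int) :
    pickingNumbers a = (List.range (pvS a).length).foldl (fun m k => max m (pvCnt a k)) 0 := by
  unfold pickingNumbers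
  simp only []
  rw [PySem.List.pyRange_zero_natCast, List.foldl_map]
  apply PySem.List.foldl_congr_mem
  intro acc k hk
  rw [List.mem_range] at hk
  rw [PySem.List.foldl_pyRange_pyGetD' (PySem.List.sorted a (fun x => x) false) 0
      (f := fun count y =>
        if |PySem.List.pyGetD (PySem.List.sorted a (fun x => x) false) (↑k) 0 - y| = 1 ∨
           |PySem.List.pyGetD (PySem.List.sorted a (fun x => x) false) (↑k) 0 - y| = 0
        then count + 1 else count) 0 (Int.natCast_nonneg k)]
  rw [PySem.List.foldl_ite_add_one]
  rw [max_comm]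
  congr 1
  simp only [Int.toNat_natCast, PySem.List.pyGetD_natCast, zero_add]
  rw [show (PySem.List.sorted a (fun x => x) false) = pvS a from rfl]
  rw [List.countP_congr (q := fun y => decide (y = (pvS a).getD k 0 ∨ y = (pvS a).getD k 0 + 1))
      (by
        intro y hy
        have hle := pv_sorted_drop_ge a k (by simpa [pvS] using hk) y hy
        constructor <;> intro h <;>
          simp only [decide_eq_true_eq, Int.abs_eq_natAbs] at h ⊢ <;> omega)]
  rw [pv_countP_two _ _ _ (by omega)]
  simp [pvCnt]

-- B's port equals the fold of pvG over the distinct values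
theorem pv_B_eq (a : List Int) :
    pickingNumbers_alt a = (PySem.Set.ofList a).foldl (fun best v => max best (pvG a v)) 0 := by
  unfold pickingNumbers_alt
  simp only []
  rw [PySem.Dict.foldl_insert_getD_add_one_eq_counter, PySem.Dict.items_counter, List.foldl_map]
  simp [PySem.Dict.getD_counter, pvG]

-- sorted counts are the original counts
theorem pv_count_sorted (a : List Int) (v : Int) : (pvS a).count v = a.count v :=
  (PySem.List.sorted_perm a (fun x => x) false).count_eq v

theorem pickingNumbers_eq_alt (a : List Int) : pickingNumbers a = pickingNumbers_alt a := by
  rw [pv_A_eq, pv_B_eq]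
  apply le_antisymm
  · apply pv_foldl_max_le _ _ _ _ ((PySem.List.le_foldl_max_int _ _ _).1)
    intro k hk
    rw [List.mem_range] at hk
    have hmem : (pvS a).getD k 0 ∈ a := by
      rw [List.getD_eq_getElem _ _ hk]
      exact (PySem.List.mem_sorted a (fun x => x) false _).mp (List.getElem_mem hk)
    calc pvCnt a k ≤ pvG a ((pvS a).getD k 0) := by
          unfold pvCnt pvG
          rw [← pv_count_sorted a ((pvS a).getD k 0), ← pv_count_sorted a ((pvS a).getD k 0 + 1)]
          have h1 := ((List.drop_sublist k (pvS a)).count_le ((pvS a).getD k 0))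
          have h2 := ((List.drop_sublist k (pvS a)).count_le ((pvS a).getD k 0 + 1))
          omega
      _ ≤ _ := (PySem.List.le_foldl_max_int _ _ _).2 _ (by
          rw [PySem.Set.mem_ofList]; exact hmem)
  · apply pv_foldl_max_le _ _ _ _ ((PySem.List.le_foldl_max_int _ _ _).1)
    intro v hv
    rw [PySem.Set.mem_ofList] at hv
    have hvS : v ∈ pvS a := (PySem.List.mem_sorted a (fun x => x) false v).mpr hv
    set k := (pvS a).idxOf v with hkdef
    have hk : k < (pvS a).length := List.idxOf_lt_length_of_mem hvS
    have hgk : (pvS a).getD k 0 = v := by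
      rw [List.getD_eq_getElem _ _ hk]; exact List.getElem_idxOf hk
    have htake_v : v ∉ (pvS a).take k := by
      rw [List.mem_take_iff_idxOf_lt hvS]; omega
    have hcv : ((pvS a).drop k).count v = (pvS a).count v := by
      conv_rhs => rw [← List.take_append_drop k (pvS a)]
      rw [List.count_append, List.count_eq_zero_of_not_mem htake_v]; omega
    have hcv1 : ((pvS a).drop k).count (v + 1) = (pvS a).count (v + 1) := by
      by_cases hmem : v + 1 ∈ pvS a
      · have htake : v + 1 ∉ (pvS a).take k := by
          rw [List.mem_take_iff_idxOf_lt hmem]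
          intro hlt
          have hk1 : (pvS a).idxOf (v + 1) < (pvS a).length := List.idxOf_lt_length_of_mem hmem
          have hmono := PySem.List.sorted_id_getElem_mono a (p := (pvS a).idxOf (v + 1)) (q := k)
            (by omega) (by simpa [pvS] using hk)
          have hgk' : (pvS a)[k] = v := by rw [← List.getD_eq_getElem _ _ hk]; exact hgk
          have hcontra : ¬ ((pvS a)[(pvS a).idxOf (v + 1)]'hk1 ≤ (pvS a)[k]'hk) := by
            rw [List.getElem_idxOf hk1, hgk']; omega
          exact hcontra hmono
        conv_rhs => rw [← List.take_append_drop k (pvS a)]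
        rw [List.count_append, List.count_eq_zero_of_not_mem htake]; omega
      · have h0 : (pvS a).count (v + 1) = 0 := List.count_eq_zero_of_not_mem hmem
        have := (List.drop_sublist k (pvS a)).count_le (v + 1)
        omega
    calc pvG a v = pvCnt a k := by
          unfold pvG pvCnt
          rw [hgk, hcv, hcv1, pv_count_sorted, pv_count_sorted]
      _ ≤ _ := (PySem.List.le_foldl_max_int _ _ _).2 k (List.mem_range.mpr hk)

-- ===== VERDICT (by name: the statement is the Claim_ definition above) =====
theorem pickingNumbers_spec : Claim_equal_pickingNumbers := by
  intro a _
  unfold Spec_pickingNumbers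
  exact pickingNumbers_eq_alt a
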